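-- pv_equiv track=rewrite | github.com/ycwu314/ycwu314.github.io | .travis/UpdateFile.py | do_replace_line
-- ===== SOURCE A (Python) =====
-- def do_replace_line(line, cmap={}):
--     #   &#x4F60;
--     new_line = ''
--     for ch in line:
--         x = ch
--         if ch in cmap:
--             array = cmap[ch]
--             x = '&#' + str(array[0]).replace('0x', 'x') + ';'
--         new_line = new_line + x
--     return new_line
-- ===== SOURCE B (Python) =====
-- def do_replace_line(line, cmap={}):
--     table = {ord(k): '&#' + str(v[0]).replace('0x', 'x') + ';'
--              for k, v in cmap.items() if len(k) == 1 and v}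
--     return line.translate(table)
-- ===== Notes on version B (the rewrite author's own statement) =====
-- stated objective: idiomatic
-- what changed: B precomputes an ord-keyed translation table (single-character keys only, empty replacement lists skipped) and returns line.translate(table) in one library call instead of A's explicit loop that looks each character up in the dict and accumulates the output string by concatenation.
-- crash fix: When some character of line is a cmap key whose value list is empty, A raises IndexError on array[0]; B skips such entries when building the table and leaves that character unchanged. — e.g. on do_replace_line("ba", [("a", [])]): A raises IndexError, B returns "ba"
import Mathlib
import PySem

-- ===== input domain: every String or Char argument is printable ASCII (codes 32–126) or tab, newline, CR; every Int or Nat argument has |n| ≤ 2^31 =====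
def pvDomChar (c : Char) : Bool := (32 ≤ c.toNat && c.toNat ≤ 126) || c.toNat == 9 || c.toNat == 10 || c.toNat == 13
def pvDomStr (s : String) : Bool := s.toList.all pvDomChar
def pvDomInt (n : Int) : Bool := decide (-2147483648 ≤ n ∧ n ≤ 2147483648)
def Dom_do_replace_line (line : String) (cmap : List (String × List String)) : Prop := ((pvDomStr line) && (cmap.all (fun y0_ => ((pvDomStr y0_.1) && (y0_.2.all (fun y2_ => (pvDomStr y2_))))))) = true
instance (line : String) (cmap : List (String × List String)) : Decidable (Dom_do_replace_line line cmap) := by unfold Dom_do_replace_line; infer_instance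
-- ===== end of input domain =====

-- B precomputes a Char-keyed translation table and maps the line through it in one
-- pass, instead of A's per-character dict lookup inside an accumulating loop.

-- ===== PORT A =====
-- A's per-character loop: look the 1-char string up in the dict, append either the
-- replacement '&#…;' (array[0] ported as pyGetD array 0 "", total under Pre_) or the char.
def do_replace_line (line : String) (cmap : List (String × List String)) : String :=
  let d := PySem.Dict.ofList cmap
  String.ofList (line.toList.foldl (fun new_line ch =>
    match d.get? (String.ofList [ch]) with
    | some array =>
        new_line ++ (('&' :: '#' ::
          PySem.Chars.replace (PySem.List.pyGetD array 0 "").toList ['0', 'x'] ['x']) ++ [';'])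
    | none => new_line ++ [ch]) [])

-- ===== PORT B =====
-- '&#' + v0.replace('0x','x') + ';'
def pvRepl (v0 : String) : String :=
  String.ofList (('&' :: '#' :: PySem.Chars.replace v0.toList ['0', 'x'] ['x']) ++ [';'])

-- the dict comprehension: single-character keys with a nonempty value list
def pvTable (cmap : List (String × List String)) : PySem.Dict Char String :=
  (PySem.Dict.ofList cmap).items.foldl (fun t p =>
    match p.1.toList, p.2 with
    | [c], v0 :: _ => t.insert c (pvRepl v0)
    | _, _ => t) PySem.Dict.empty

-- line.translate(table): each char becomes its table entry, or itself
def do_replace_line_alt (line : String) (cmap : List (String × List String)) : String :=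
  String.ofList (line.toList.flatMap (fun c =>
    match (pvTable cmap).get? c with
    | some r => r.toList
    | none => [c]))

-- ===== PRECONDITION & SPEC =====
-- Pre_ excludes exactly the inputs where A raises IndexError: some character of line
-- is a key of the dict whose value list is empty (array[0] fails).
def Pre_do_replace_line (line : String) (cmap : List (String × List String)) : Prop :=
  line.toList.all
    (fun ch => (PySem.Dict.ofList cmap).get? (String.ofList [ch]) != some []) = true
instance (line : String) (cmap : List (String × List String)) : Decidable (Pre_do_replace_line line cmap) := by unfold Pre_do_replace_line; infer_instance

def pvWitness_do_replace_line : String × (List (String × List String)) :=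
  ("hi a", [("a", ["0x4F60"]), ("zz", ["0x1"])])

-- On inputs where some character of line is a cmap key with an empty value list, A raises
-- IndexError on array[0]; B skips such entries when building the table and leaves the character unchanged.
def Raises_do_replace_line (line : String) (cmap : List (String × List String)) : Prop :=
  line.toList.any
    (fun ch => (PySem.Dict.ofList cmap).get? (String.ofList [ch]) == some []) = true
instance (line : String) (cmap : List (String × List String)) : Decidable (Raises_do_replace_line line cmap) := by unfold Raises_do_replace_line; infer_instance
def pvRaiseWitness_do_replace_line : String × (List (String × List String)) := ("ba", [("a", [])])
def pvRaiseWitnessOut_do_replace_line : String := "ba"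

def Spec_do_replace_line (line : String) (cmap : List (String × List String)) (out : String) : Prop := out = do_replace_line_alt line cmap
instance (line : String) (cmap : List (String × List String)) (out : String) : Decidable (Spec_do_replace_line line cmap out) := by unfold Spec_do_replace_line; infer_instance

-- ===== CLAIM (what is proved, stated in full; the proofs are below) =====
def Claim_equal_do_replace_line : Prop := ∀ (line : String) (cmap : List (String × List String)), Dom_do_replace_line line cmap → Pre_do_replace_line line cmap → Spec_do_replace_line line cmap (do_replace_line line cmap)

def Claim_raises_do_replace_line : Prop := (∀ (line : String) (cmap : List (String × List String)), Dom_do_replace_line line cmap → Raises_do_replace_line line cmap → ¬ Pre_do_replace_line line cmap) ∧ (Dom_do_replace_line (pvRaiseWitness_do_replace_line.1) (pvRaiseWitness_do_replace_line.2) ∧ Raises_do_replace_line (pvRaiseWitness_do_replace_line.1) (pvRaiseWitness_do_replace_line.2) ∧ do_replace_line_alt (pvRaiseWitness_do_replace_line.1) (pvRaiseWitness_do_replace_line.2) = pvRaiseWitnessOut_do_replace_line)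

-- ===== LEMMAS AND PROOFS =====

-- Dict.get? on a literal dict is first-match association-list lookup.
lemma get?_mk_eq_lookup (l : List (String × List String)) (key : String) :
    (PySem.Dict.mk l).get? key = l.lookup key := by
  induction l with
  | nil => rfl
  | cons p rest ih =>
      rw [show p = (p.1, p.2) from rfl, PySem.Dict.get?_mk_cons, List.lookup]
      by_cases h : p.1 = key
      · rw [if_pos (beq_iff_eq.mpr h), show (key == p.1) = true from beq_iff_eq.mpr h.symm]
      · rw [if_neg (by simpa using h),
            show (key == p.1) = false from beq_eq_false_iff_ne.mpr (fun e => h e.symm), ih]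

-- the table-building step never touches char c when no key is the 1-char string of c
lemma foldl_table_get_notmem (ps : List (String × List String)) (t : PySem.Dict Char String)
    (c : Char) (h : String.ofList [c] ∉ ps.map Prod.fst) :
    (ps.foldl (fun t p =>
      match p.1.toList, p.2 with
      | [c'], v0 :: _ => t.insert c' (pvRepl v0)
      | _, _ => t) t).get? c = t.get? c := by
  induction ps generalizing t with
  | nil => rfl
  | cons p rest ih =>
      simp only [List.map_cons, List.mem_cons, not_or] at h
      rw [List.foldl_cons, ih _ h.2]
      cases hk : p.1.toList with
      | nil => rfl
      | cons c' tl =>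
          cases tl with
          | cons _ _ => rfl
          | nil =>
              cases hv : p.2 with
              | nil => rfl
              | cons v0 vs =>
                  have hne : c ≠ c' := by
                    intro hc; subst hc
                    exact h.1 (by rw [← hk, String.ofList_toList])
                  simp [PySem.Dict.get?_insert_of_ne _ _ hne]

-- get? of the built table, characterised by first-match lookup in the source list
lemma foldl_table_get (ps : List (String × List String)) (t : PySem.Dict Char String)
    (c : Char) (hnd : (ps.map Prod.fst).Nodup) :
    (ps.foldl (fun t p =>
      match p.1.toList, p.2 with
      | [c'], v0 :: _ => t.insert c' (pvRepl v0)
      | _, _ => t) t).get? c =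
    (match ps.lookup (String.ofList [c]) with
     | some (v0 :: _) => some (pvRepl v0)
     | _ => t.get? c) := by
  induction ps generalizing t with
  | nil => rfl
  | cons p rest ih =>
      simp only [List.map_cons, List.nodup_cons] at hnd
      rw [List.foldl_cons, List.lookup]
      by_cases hkey : p.1 = String.ofList [c]
      · have hk : p.1.toList = [c] := by rw [hkey, String.toList_ofList]
        have hnotmem : String.ofList [c] ∉ rest.map Prod.fst := by
          rw [← hkey]; exact hnd.1
        rw [show (String.ofList [c] == p.1) = true from beq_iff_eq.mpr hkey.symm]
        cases hv : p.2 with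
        | nil =>
            rw [foldl_table_get_notmem _ _ _ hnotmem, hk]
        | cons v0 vs =>
            rw [foldl_table_get_notmem _ _ _ hnotmem, hk]
            simp [PySem.Dict.get?_insert_self]
      · rw [show (String.ofList [c] == p.1) = false from
              beq_eq_false_iff_ne.mpr (fun e => hkey e.symm)]
        have hstep : ((match p.1.toList, p.2 with
              | [c'], v0 :: _ => t.insert c' (pvRepl v0)
              | _, _ => t) : PySem.Dict Char String).get? c = t.get? c := by
          cases hk : p.1.toList with
          | nil => rfl
          | cons a tl =>
              cases tl with
              | cons _ _ => rfl
              | nil =>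
                  cases hv : p.2 with
                  | nil => rfl
                  | cons v0 vs =>
                      have hne : c ≠ a := by
                        intro hc; subst hc
                        exact hkey (by rw [← String.ofList_toList (s := p.1), hk])
                      simp [PySem.Dict.get?_insert_of_ne _ _ hne]
        rw [ih _ hnd.2]
        cases hl : rest.lookup (String.ofList [c]) with
        | none => simpa using hstep
        | some v => cases v with
          | nil => simpa using hstep
          | cons v0 vs => rfl

-- the table entry for a char, in terms of A's dict lookup
lemma table_get_char (cmap : List (String × List String)) (c : Char) :
    (pvTable cmap).get? c =
      (match (PySem.Dict.ofList cmap).get? (String.ofList [c]) with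
       | some (v0 :: _) => some (pvRepl v0)
       | _ => none) := by
  have hnd : (((PySem.Dict.ofList cmap).items.map Prod.fst)).Nodup := by
    simpa [PySem.Dict.keys] using PySem.Dict.nodup_keys_ofList (ps := cmap)
  rw [pvTable, foldl_table_get _ _ _ hnd]
  rw [show (PySem.Dict.ofList cmap).get? (String.ofList [c])
        = (PySem.Dict.ofList cmap).items.lookup (String.ofList [c]) from
      get?_mk_eq_lookup (PySem.Dict.ofList cmap).items (String.ofList [c])]
  cases (PySem.Dict.ofList cmap).items.lookup (String.ofList [c]) with
  | none => rfl
  | some v => cases v <;> rfl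

-- ===== VERDICT (by name: the statement is the Claim_ definition above) =====
theorem do_replace_line_spec : Claim_equal_do_replace_line := by
  intro line cmap _ hpre
  unfold Spec_do_replace_line do_replace_line do_replace_line_alt
  dsimp only
  congr 1
  rw [PySem.List.foldl_congr_mem (g := fun acc c => acc ++
        (match (pvTable cmap).get? c with
         | some r => r.toList
         | none => [c]))]
  · rw [PySem.List.foldl_append_eq_flatMap]
    simp
  · intro acc ch hch
    rw [table_get_char]
    cases hd : (PySem.Dict.ofList cmap).get? (String.ofList [ch]) with
    | none => rfl
    | some array =>
        cases array with
        | nil =>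
            exact absurd hd (by simpa using List.all_eq_true.mp hpre ch hch)
        | cons v0 vs =>
            dsimp only
            rw [PySem.List.pyGetD_zero_cons]
            simp only [pvRepl, String.toList_ofList, List.cons_append]

@[simp]
theorem do_replace_line_raises : Claim_raises_do_replace_line := by
  unfold Claim_raises_do_replace_line
  refine ⟨?_, by decide, by decide, by decide⟩
  intro line cmap _ hr hpre
  obtain ⟨ch, hch, heq⟩ := List.any_eq_true.mp hr
  have hne := List.all_eq_true.mp hpre ch hch
  simp only [beq_iff_eq] at heq
  simp only [bne_iff_ne, ne_eq] at hne
  exact hne heq
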